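-- pv_equiv track=rewrite | github.com/Franchichizola/Algoritmos-Y-Estructura-De-Datos | ejercicio_22.py | usar_la_fuerza
-- ===== SOURCE A (Python) =====
-- def usar_la_fuerza(mochila,objetos_sacados=0):
--     if not mochila:
--         return (False, objetos_sacados)
--     objeto_actual = mochila[0]
--     objetos_sacados_actual = objetos_sacados + 1
--     if objeto_actual == "sable de luz":
--         return (True, objetos_sacados_actual)
--     else:
--         return usar_la_fuerza(mochila[1:], objetos_sacados_actual)
-- ===== SOURCE B (Python) =====
-- def usar_la_fuerza(mochila, objetos_sacados=0):
--     for i, objeto in enumerate(mochila):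
--         if objeto == "sable de luz":
--             return (True, objetos_sacados + i + 1)
--     return (False, objetos_sacados + len(mochila))
-- ===== Notes on version B (the rewrite author's own statement) =====
-- stated objective: faster
-- what changed: Replaced the recursive search that copies the tail of the list (mochila[1:]) at every step with a single enumerate loop that returns the first match's position added to the running count, or the list length on failure.
import Mathlib
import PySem

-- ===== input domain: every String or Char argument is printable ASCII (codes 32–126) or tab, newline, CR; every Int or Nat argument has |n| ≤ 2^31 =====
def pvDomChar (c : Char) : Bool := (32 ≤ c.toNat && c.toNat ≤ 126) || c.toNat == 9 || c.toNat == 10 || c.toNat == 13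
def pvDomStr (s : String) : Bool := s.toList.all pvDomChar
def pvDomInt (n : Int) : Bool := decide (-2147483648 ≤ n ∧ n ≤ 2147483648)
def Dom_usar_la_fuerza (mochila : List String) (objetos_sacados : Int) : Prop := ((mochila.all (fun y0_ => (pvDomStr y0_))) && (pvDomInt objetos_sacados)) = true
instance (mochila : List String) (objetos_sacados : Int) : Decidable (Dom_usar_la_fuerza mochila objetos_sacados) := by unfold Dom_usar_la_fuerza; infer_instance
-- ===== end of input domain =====

-- B replaces A's recursive tail-slicing search with one linear index scan (same return value).
-- ===== PORT A =====
-- recursive descent, as A: consume the head, increment the counter, recurse on the tail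
def usar_la_fuerza (mochila : List String) (objetos_sacados : Int) : Bool × Int :=
  match mochila with
  | [] => (false, objetos_sacados)
  | objeto_actual :: rest =>
    let objetos_sacados_actual := objetos_sacados + 1
    if objeto_actual = "sable de luz" then (true, objetos_sacados_actual)
    else usar_la_fuerza rest objetos_sacados_actual

-- ===== PORT B =====
-- B's enumerate loop: first index of "sable de luz", if any
def pvFindIdx : List String → Option Nat
  | [] => none
  | objeto :: rest =>
    if objeto = "sable de luz" then some 0
    else (pvFindIdx rest).map (· + 1)

def usar_la_fuerza_alt (mochila : List String) (objetos_sacados : Int) : Bool × Int :=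
  match pvFindIdx mochila with
  | some i => (true, objetos_sacados + i + 1)
  | none => (false, objetos_sacados + mochila.length)

-- ===== PRECONDITION & SPEC =====
def Spec_usar_la_fuerza (mochila : List String) (objetos_sacados : Int) (out : Bool × Int) : Prop := out = usar_la_fuerza_alt mochila objetos_sacados
instance (mochila : List String) (objetos_sacados : Int) (out : Bool × Int) : Decidable (Spec_usar_la_fuerza mochila objetos_sacados out) := by unfold Spec_usar_la_fuerza; infer_instance

-- ===== CLAIM (what is proved, stated in full; the proofs are below) =====
def Claim_equal_usar_la_fuerza : Prop := ∀ (mochila : List String) (objetos_sacados : Int), Dom_usar_la_fuerza mochila objetos_sacados → Spec_usar_la_fuerza mochila objetos_sacados (usar_la_fuerza mochila objetos_sacados)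

-- ===== LEMMAS AND PROOFS =====

-- ===== VERDICT (by name: the statement is the Claim_ definition above) =====
theorem eq_all (mochila : List String) (objetos_sacados : Int) :
    usar_la_fuerza mochila objetos_sacados = usar_la_fuerza_alt mochila objetos_sacados := by
  induction mochila generalizing objetos_sacados with
  | nil => simp [usar_la_fuerza, usar_la_fuerza_alt, pvFindIdx]
  | cons h t ih =>
    by_cases hh : h = "sable de luz"
    · simp [usar_la_fuerza, usar_la_fuerza_alt, pvFindIdx, hh]
    · rw [show usar_la_fuerza (h :: t) objetos_sacados = usar_la_fuerza t (objetos_sacados + 1) by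
        simp [usar_la_fuerza, hh], ih]
      unfold usar_la_fuerza_alt
      simp only [pvFindIdx, hh, if_neg, ite_false]
      cases hf : pvFindIdx t with
      | none => simp; ring
      | some i => simp; ring

theorem usar_la_fuerza_spec : Claim_equal_usar_la_fuerza := by
  intro mochila objetos_sacados _
  unfold Spec_usar_la_fuerza
  exact eq_all mochila objetos_sacados
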